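-- pv_equiv track=rewrite | github.com/codesedoc/LSSE | utils/general_tool.py | compare_two_dict_keys
-- ===== SOURCE A (Python) =====
-- def compare_two_dict_keys(dict1, dict2):
--     for key in dict1.keys():
--         if key not in dict2:
--             return False
--
--     for key in dict2.keys():
--         if key not in dict1:
--             return False
--     return True
-- ===== SOURCE B (Python) =====
-- def compare_two_dict_keys(dict1, dict2):
--     return len(dict1) == len(dict2) and all(k in dict2 for k in dict1)
-- ===== Notes on version B (the rewrite author's own statement) =====
-- stated objective: simpler
-- what changed: Replaces A's two symmetric membership loops by a constant-time length comparison plus a single directional containment scan, exact because dict keys are unique (equal size + one-way containment implies equal key sets).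
import Mathlib
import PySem

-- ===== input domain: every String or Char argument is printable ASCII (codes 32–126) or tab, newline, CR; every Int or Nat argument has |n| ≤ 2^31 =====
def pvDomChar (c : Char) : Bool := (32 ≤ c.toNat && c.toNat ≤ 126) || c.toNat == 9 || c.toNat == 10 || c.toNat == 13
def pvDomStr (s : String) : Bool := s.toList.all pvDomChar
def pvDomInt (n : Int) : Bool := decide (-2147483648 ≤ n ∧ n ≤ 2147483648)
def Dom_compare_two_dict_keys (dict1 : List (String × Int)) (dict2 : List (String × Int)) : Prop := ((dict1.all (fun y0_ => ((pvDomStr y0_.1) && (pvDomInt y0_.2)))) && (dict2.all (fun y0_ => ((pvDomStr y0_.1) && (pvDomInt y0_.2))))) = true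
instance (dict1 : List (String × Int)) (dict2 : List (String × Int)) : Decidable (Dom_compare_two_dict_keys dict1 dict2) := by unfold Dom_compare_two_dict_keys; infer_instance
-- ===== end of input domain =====

-- B replaces A's two symmetric membership loops by a length guard plus one directional
-- containment scan (objective: simpler); exact because dict keys are unique.

-- ===== PORT A =====
-- 'key in d' for a dict: membership among the keys
def pvKeyIn (d : List (String × Int)) (k : String) : Bool := d.any (fun p => p.1 == k)

-- second for-loop of A: over dict2's keys, testing membership in dict1
def pvALoop2 (dict1 : List (String × Int)) : List (String × Int) → Bool
  | [] => true
  | p :: rest => if !(pvKeyIn dict1 p.1) then false else pvALoop2 dict1 rest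

-- first for-loop of A: over dict1's keys, testing membership in dict2; falls through to loop 2
def pvALoop1 (dict2 : List (String × Int)) (dict1 : List (String × Int)) : List (String × Int) → Bool
  | [] => pvALoop2 dict1 dict2
  | p :: rest => if !(pvKeyIn dict2 p.1) then false else pvALoop1 dict2 dict1 rest

def compare_two_dict_keys (dict1 : List (String × Int)) (dict2 : List (String × Int)) : Bool :=
  pvALoop1 dict2 dict1 dict1

-- ===== PORT B =====
def compare_two_dict_keys_alt (dict1 : List (String × Int)) (dict2 : List (String × Int)) : Bool :=
  dict1.length == dict2.length && dict1.all (fun p => pvKeyIn dict2 p.1)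

-- ===== PRECONDITION & SPEC =====
-- Pre_ states the dict invariant: an association list standing for a Python dict has
-- pairwise-distinct keys (a Python dict can never present duplicate keys, so this
-- excludes no input the Python A is ever called on).
def pvNoDupKeys : List (String × Int) → Bool
  | [] => true
  | p :: t => !(t.any (fun q => q.1 == p.1)) && pvNoDupKeys t

def Pre_compare_two_dict_keys (dict1 : List (String × Int)) (dict2 : List (String × Int)) : Prop :=
  pvNoDupKeys dict1 = true ∧ pvNoDupKeys dict2 = true
instance (dict1 : List (String × Int)) (dict2 : List (String × Int)) : Decidable (Pre_compare_two_dict_keys dict1 dict2) := by unfold Pre_compare_two_dict_keys; infer_instance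

def pvWitness_compare_two_dict_keys : (List (String × Int)) × (List (String × Int)) :=
  ([("a", 1), ("b", 2)], [("b", 7), ("a", 0)])

def Spec_compare_two_dict_keys (dict1 : List (String × Int)) (dict2 : List (String × Int)) (out : Bool) : Prop := out = compare_two_dict_keys_alt dict1 dict2
instance (dict1 : List (String × Int)) (dict2 : List (String × Int)) (out : Bool) : Decidable (Spec_compare_two_dict_keys dict1 dict2 out) := by unfold Spec_compare_two_dict_keys; infer_instance

-- ===== CLAIM (what is proved, stated in full; the proofs are below) =====
def Claim_equal_compare_two_dict_keys : Prop := ∀ (dict1 : List (String × Int)) (dict2 : List (String × Int)), Dom_compare_two_dict_keys dict1 dict2 → Pre_compare_two_dict_keys dict1 dict2 → Spec_compare_two_dict_keys dict1 dict2 (compare_two_dict_keys dict1 dict2)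

-- ===== LEMMAS AND PROOFS =====

theorem pvKeyIn_iff (d : List (String × Int)) (k : String) :
    pvKeyIn d k = true ↔ k ∈ d.map Prod.fst := by
  simp [pvKeyIn, List.mem_map]

theorem pvNoDupKeys_iff (d : List (String × Int)) :
    pvNoDupKeys d = true ↔ (d.map Prod.fst).Nodup := by
  induction d with
  | nil => simp [pvNoDupKeys]
  | cons p t ih =>
    simp [pvNoDupKeys, List.nodup_cons, ih, List.mem_map]
    intro _
    constructor
    · intro H x hx
      exact H p.1 x hx rfl
    · rintro H a b hab rfl
      exact H b hab

theorem pvAll_iff (da db : List (String × Int)) :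
    (∀ p ∈ da, pvKeyIn db p.1 = true) ↔ ∀ k ∈ da.map Prod.fst, k ∈ db.map Prod.fst := by
  constructor
  · intro H k hk
    obtain ⟨p, hp, rfl⟩ := List.mem_map.1 hk
    exact (pvKeyIn_iff _ _).1 (H p hp)
  · intro H p hp
    exact (pvKeyIn_iff _ _).2 (H _ (List.mem_map.2 ⟨p, hp, rfl⟩))

theorem pvALoop2_eq (dict1 rest : List (String × Int)) :
    pvALoop2 dict1 rest = rest.all (fun p => pvKeyIn dict1 p.1) := by
  induction rest with
  | nil => rfl
  | cons p t ih => by_cases h : pvKeyIn dict1 p.1 <;> simp [pvALoop2, h, ih]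

theorem pvALoop1_eq (dict2 dict1 rem : List (String × Int)) :
    pvALoop1 dict2 dict1 rem =
      (rem.all (fun p => pvKeyIn dict2 p.1) && pvALoop2 dict1 dict2) := by
  induction rem with
  | nil => simp [pvALoop1]
  | cons p t ih => by_cases h : pvKeyIn dict2 p.1 <;> simp [pvALoop1, h, ih]

-- under the nodup invariant, one-way containment plus equal lengths gives the converse containment
theorem pv_subset_iff (dict1 dict2 : List (String × Int))
    (h1 : (dict1.map Prod.fst).Nodup) (h2 : (dict2.map Prod.fst).Nodup) :
    ((∀ k ∈ dict1.map Prod.fst, k ∈ dict2.map Prod.fst) ∧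
     (∀ k ∈ dict2.map Prod.fst, k ∈ dict1.map Prod.fst)) ↔
    (dict1.length = dict2.length ∧ ∀ k ∈ dict1.map Prod.fst, k ∈ dict2.map Prod.fst) := by
  constructor
  · rintro ⟨hab, hba⟩
    refine ⟨?_, hab⟩
    have := List.Perm.length_eq
      (List.perm_of_nodup_nodup_toFinset_eq h1 h2
        (Finset.ext (fun k => by
          rw [List.mem_toFinset, List.mem_toFinset]
          exact ⟨fun h => hab k h, fun h => hba k h⟩)))
    simpa using this
  · rintro ⟨hlen, hab⟩
    refine ⟨hab, ?_⟩
    have hsub : (dict1.map Prod.fst).toFinset ⊆ (dict2.map Prod.fst).toFinset := by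
      intro k hk; simp only [List.mem_toFinset] at *; exact hab k hk
    have hcard : (dict2.map Prod.fst).toFinset.card ≤ (dict1.map Prod.fst).toFinset.card := by
      rw [List.toFinset_card_of_nodup h1, List.toFinset_card_of_nodup h2]
      simp [hlen]
    have heq := Finset.eq_of_subset_of_card_le hsub hcard
    intro k hk
    have : k ∈ (dict1.map Prod.fst).toFinset := heq ▸ List.mem_toFinset.2 hk
    exact List.mem_toFinset.1 this

-- ===== VERDICT (by name: the statement is the Claim_ definition above) =====
theorem compare_two_dict_keys_spec : Claim_equal_compare_two_dict_keys := by
  intro dict1 dict2 _ hpre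
  unfold Spec_compare_two_dict_keys compare_two_dict_keys compare_two_dict_keys_alt
  rw [pvALoop1_eq, pvALoop2_eq, Bool.eq_iff_iff]
  simp only [Bool.and_eq_true, List.all_eq_true, beq_iff_eq, pvAll_iff]
  exact pv_subset_iff dict1 dict2 ((pvNoDupKeys_iff _).1 hpre.1) ((pvNoDupKeys_iff _).1 hpre.2)
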